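-- pv_equiv track=rewrite | github.com/winatecommerce96/emailpilot-rag | pipelines/figma-comments/api/routes.py | extract_figma_urls_from_task
-- ===== SOURCE A (Python) =====
-- from typing import List, Dict, Any, Optional
--
-- def extract_figma_urls_from_task(task: Dict) -> tuple:
--     """Extract client name and Figma URL from task custom fields."""
--     custom_fields = task.get("custom_fields", [])
--
--     client_name = None
--     figma_url = None
--
--     for field in custom_fields:
--         field_name = (field.get("name") or "").lower()
--         display_value = field.get("display_value") or ""
--
--         if field_name == "client":
--             client_name = display_value
--         elif field_name == "figma url":
--             figma_url = display_value
--
--     return client_name, figma_url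
-- ===== SOURCE B (Python) =====
-- def extract_figma_urls_from_task(task):
--     """Extract client name and Figma URL from task custom fields."""
--     fields = task.get("custom_fields", [])
--
--     def last_value(key):
--         # first match scanning back-to-front == last match front-to-back
--         for field in reversed(fields):
--             if (field.get("name") or "").lower() == key:
--                 return field.get("display_value") or ""
--         return None
--
--     return last_value("client"), last_value("figma url")
-- ===== Notes on version B (the rewrite author's own statement) =====
-- stated objective: alternative
-- what changed: Replaces the single forward accumulating loop with two staged backward searches that early-return the first matching field scanned from the end (last-wins by construction), instead of tracking both variables through the whole list.
import Mathlib
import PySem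

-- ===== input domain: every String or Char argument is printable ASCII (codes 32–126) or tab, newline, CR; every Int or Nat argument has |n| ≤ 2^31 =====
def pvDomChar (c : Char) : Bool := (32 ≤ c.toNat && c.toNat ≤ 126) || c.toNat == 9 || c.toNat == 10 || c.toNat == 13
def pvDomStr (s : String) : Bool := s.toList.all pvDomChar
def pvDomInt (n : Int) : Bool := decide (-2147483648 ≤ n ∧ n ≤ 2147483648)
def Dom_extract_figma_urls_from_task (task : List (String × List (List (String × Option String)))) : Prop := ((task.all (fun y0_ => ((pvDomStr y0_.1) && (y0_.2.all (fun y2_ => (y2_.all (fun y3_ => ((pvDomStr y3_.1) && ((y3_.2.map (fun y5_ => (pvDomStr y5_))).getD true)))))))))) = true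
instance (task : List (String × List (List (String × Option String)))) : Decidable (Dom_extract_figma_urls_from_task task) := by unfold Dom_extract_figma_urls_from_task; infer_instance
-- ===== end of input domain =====

-- B replaces A's forward accumulating loop with two staged backward searches
-- (first match scanning the reversed field list, with early exit) — alternative, same cost.


-- ===== PORT A =====
-- 'field.get("name") or ""' on a dict with Option String values: .join collapses a stored
-- None, .getD "" supplies "" for a missing key; Python's 'or' also maps "" to "" — exact.
def extract_figma_urls_from_task (task : List (String × List (List (String × Option String)))) : Option String × Option String :=
  let custom_fields := (PySem.Dict.mk task).getD "custom_fields" []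
  custom_fields.foldl
    (fun st field =>
      let field_name := PySem.Str.lower ((((PySem.Dict.mk field).get? "name").join).getD "")
      let display_value := (((PySem.Dict.mk field).get? "display_value").join).getD ""
      if field_name == "client" then (some display_value, st.2)
      else if field_name == "figma url" then (st.1, some display_value)
      else st)
    (none, none)

-- ===== PORT B =====
-- helpers mirroring Source B's expressions '(field.get("name") or "").lower()' and
-- 'field.get("display_value") or ""'
def pvFieldName (field : List (String × Option String)) : String :=
  PySem.Str.lower ((((PySem.Dict.mk field).get? "name").join).getD "")
def pvDisplay (field : List (String × Option String)) : String :=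
  (((PySem.Dict.mk field).get? "display_value").join).getD ""

-- Source B's 'last_value': walk the reversed field list, return at the FIRST match
def pvLastValue (key : String) : List (List (String × Option String)) → Option String
  | [] => none
  | field :: rest =>
      if pvFieldName field == key then some (pvDisplay field) else pvLastValue key rest

def extract_figma_urls_from_task_alt (task : List (String × List (List (String × Option String)))) : Option String × Option String :=
  let fields := ((PySem.Dict.mk task).getD "custom_fields" []).reverse
  (pvLastValue "client" fields, pvLastValue "figma url" fields)

-- ===== PRECONDITION & SPEC =====
def Spec_extract_figma_urls_from_task (task : List (String × List (List (String × Option String)))) (out : Option String × Option String) : Prop := out = extract_figma_urls_from_task_alt task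
instance (task : List (String × List (List (String × Option String)))) (out : Option String × Option String) : Decidable (Spec_extract_figma_urls_from_task task out) := by unfold Spec_extract_figma_urls_from_task; infer_instance

-- ===== CLAIM (what is proved, stated in full; the proofs are below) =====
def Claim_equal_extract_figma_urls_from_task : Prop := ∀ (task : List (String × List (List (String × Option String)))), Dom_extract_figma_urls_from_task task → Spec_extract_figma_urls_from_task task (extract_figma_urls_from_task task)

-- ===== LEMMAS AND PROOFS =====

-- first-match search distributes over append with left priority
theorem pvLastValue_append (key : String) (xs ys : List (List (String × Option String))) :
    pvLastValue key (xs ++ ys) = (pvLastValue key xs).or (pvLastValue key ys) := by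
  induction xs with
  | nil => simp [pvLastValue]
  | cons f rest ih =>
    by_cases h : pvFieldName f == key
    · simp [pvLastValue, h]
    · simp [pvLastValue, h, ih]

-- A's accumulated pair after folding l from state s is exactly the backward search on
-- l.reverse, falling back to s where the search finds nothing.
theorem pv_fold_eq (l : List (List (String × Option String))) (s : Option String × Option String) :
    l.foldl
      (fun st field =>
        let field_name := PySem.Str.lower ((((PySem.Dict.mk field).get? "name").join).getD "")
        let display_value := (((PySem.Dict.mk field).get? "display_value").join).getD ""
        if field_name == "client" then (some display_value, st.2)
        else if field_name == "figma url" then (st.1, some display_value)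
        else st) s
    = ((pvLastValue "client" l.reverse).elim s.1 some,
       (pvLastValue "figma url" l.reverse).elim s.2 some) := by
  induction l generalizing s with
  | nil => simp [pvLastValue]
  | cons f rest ih =>
    simp only [List.foldl_cons, List.reverse_cons]
    rw [ih, pvLastValue_append, pvLastValue_append]
    cases hc : pvLastValue "client" rest.reverse <;>
    cases hf : pvLastValue "figma url" rest.reverse <;>
      by_cases h1 : pvFieldName f = "client" <;>
      by_cases h2 : pvFieldName f = "figma url" <;>
        simp_all [pvLastValue, pvFieldName, pvDisplay, Option.or]

theorem extract_figma_urls_from_task_eq (task : List (String × List (List (String × Option String)))) :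
    extract_figma_urls_from_task task = extract_figma_urls_from_task_alt task := by
  unfold extract_figma_urls_from_task extract_figma_urls_from_task_alt
  rw [pv_fold_eq]
  cases hc : pvLastValue "client" ((PySem.Dict.mk task).getD "custom_fields" []).reverse <;>
  cases hf : pvLastValue "figma url" ((PySem.Dict.mk task).getD "custom_fields" []).reverse <;>
    simp [hc, hf]

-- ===== VERDICT (by name: the statement is the Claim_ definition above) =====
theorem extract_figma_urls_from_task_spec : Claim_equal_extract_figma_urls_from_task := by
  intro task _
  exact extract_figma_urls_from_task_eq task
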